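-- pv_equiv track=rewrite | github.com/Xinrt/RISCV-processor-simulation | code/convertor.py | int_to_bitstring
-- ===== SOURCE A (Python) =====
-- def int_to_bitstring(bit: int) -> str:
--
--     if not isinstance(bit, int):
--         if isinstance(bit, str):
--             while len(bit) < 32:
--                 bit = '0' + bit
--             return bit
--         else:
--             raise Exception('The input is neither a int nor a string')
--     if bit < 0:
--         reverse_bit = -bit - 1
--         reverse_bitstring = bin(reverse_bit)[2:]
--         bitstring = ''
--         for bit in reverse_bitstring:
--             if bit == '1':
--                 bitstring += '0'
--             else:
--                 bitstring += '1'
--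
--         if len(bitstring) > 32:
--             bitstring = bitstring[-32:]
--         while len(bitstring) < 32:
--             bitstring = '1' + bitstring
--     else:
--         bitstring = bin(bit)[2:]
--         if len(bitstring) > 32:
--             bitstring = bitstring[-32:]
--
--         while len(bitstring) < 32:
--             bitstring = '0' + bitstring
--     return bitstring
-- ===== SOURCE B (Python) =====
-- def int_to_bitstring(bit: int) -> str:
--     if not isinstance(bit, int):
--         if isinstance(bit, str):
--             return bit.rjust(32, '0')
--         raise Exception('The input is neither a int nor a string')
--     return format(bit & 0xFFFFFFFF, '032b')
-- ===== Notes on version B (the rewrite author's own statement) =====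
-- stated objective: simpler
-- what changed: Replaces the negative-case bit-inversion loop and the bin()/truncate/pad-while logic with a single arithmetic mask (bit & 0xFFFFFFFF, i.e. reduction mod 2^32) followed by one fixed-width formatting call; the string branch becomes one rjust.
import Mathlib
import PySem

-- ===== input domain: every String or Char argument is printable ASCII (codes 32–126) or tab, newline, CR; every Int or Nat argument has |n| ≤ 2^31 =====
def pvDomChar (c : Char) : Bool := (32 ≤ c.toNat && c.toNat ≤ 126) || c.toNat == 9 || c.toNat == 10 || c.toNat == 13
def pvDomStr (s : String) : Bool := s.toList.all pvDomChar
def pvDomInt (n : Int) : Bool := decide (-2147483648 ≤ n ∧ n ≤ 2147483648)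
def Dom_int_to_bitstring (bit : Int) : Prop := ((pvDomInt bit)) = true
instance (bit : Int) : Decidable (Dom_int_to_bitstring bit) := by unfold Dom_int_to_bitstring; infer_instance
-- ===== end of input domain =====

-- B replaces A's bin()/invert-loop/truncate/pad-while pipeline with one arithmetic mask
-- (bit & 0xFFFFFFFF = bit mod 2^32) plus a single fixed-width 32-bit formatting (objective: simpler).
-- The Lean signature is Int, so only A's int branch is ported (the str/raise branches are unreachable).

-- ===== PORT A =====
-- the character of the low bit of n ('1' iff n % 2 == 1)
def pvBit (n : Nat) : Char := if n % 2 = 1 then '1' else '0'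

-- exact port of Python's bin(n)[2:]: most-significant-first binary digits, bin(0)[2:] = "0"
def pvBin (n : Nat) : List Char :=
  if n ≤ 1 then [pvBit n]
  else pvBin (n / 2) ++ [pvBit n]
decreasing_by omega

-- A's for-loop: bitstring = ''; for c in s: bitstring += '0' if c == '1' else '1'
def pvInvert (s : List Char) : List Char :=
  s.foldl (fun acc c => acc ++ [if c = '1' then '0' else '1']) []

-- A's while-loop: while len(s) < 32: s = c + s
def pvPad (c : Char) (s : List Char) : List Char :=
  if s.length < 32 then pvPad c (c :: s) else s
termination_by 32 - s.length
decreasing_by simp; omega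

def int_to_bitstring (bit : Int) : String :=
  if bit < 0 then
    let reverseBit := (-bit - 1).toNat
    let reverseBitstring := pvBin reverseBit
    let bs0 := pvInvert reverseBitstring
    -- bitstring = bitstring[-32:] when longer than 32 (s[-32:] with len > 32 = drop (len-32))
    let bs1 := if bs0.length > 32 then bs0.drop (bs0.length - 32) else bs0
    String.ofList (pvPad '1' bs1)
  else
    let bs0 := pvBin bit.toNat
    let bs1 := if bs0.length > 32 then bs0.drop (bs0.length - 32) else bs0
    String.ofList (pvPad '0' bs1)

-- ===== PORT B =====
-- exact port of format(x, '032b') for x < 2^32: the k low bits of n, most significant first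
def pvBitsFix (k n : Nat) : List Char :=
  match k with
  | 0 => []
  | k + 1 => pvBitsFix k (n / 2) ++ [pvBit n]

def int_to_bitstring_alt (bit : Int) : String :=
  -- bit & 0xFFFFFFFF (all-ones mask) = Python's bit % 2**32
  String.ofList (pvBitsFix 32 (PySem.Int.mod bit 4294967296).toNat)

-- ===== PRECONDITION & SPEC =====
def Spec_int_to_bitstring (bit : Int) (out : String) : Prop := out = int_to_bitstring_alt bit
instance (bit : Int) (out : String) : Decidable (Spec_int_to_bitstring bit out) := by unfold Spec_int_to_bitstring; infer_instance

-- ===== CLAIM (what is proved, stated in full; the proofs are below) =====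
def Claim_equal_int_to_bitstring : Prop := ∀ (bit : Int), Dom_int_to_bitstring bit → Spec_int_to_bitstring bit (int_to_bitstring bit)

-- ===== LEMMAS AND PROOFS =====

theorem pvInvert_eq_map (s : List Char) :
    pvInvert s = s.map (fun c => if c = '1' then '0' else '1') := by
  unfold pvInvert
  suffices h : ∀ (s : List Char) (acc : List Char),
      s.foldl (fun acc c => acc ++ [if c = '1' then '0' else '1']) acc
        = acc ++ s.map (fun c => if c = '1' then '0' else '1') by
    simpa using h s []
  intro s
  induction s with
  | nil => simp
  | cons c t ih => intro acc; simp [List.foldl, ih]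

theorem pvPad_eq (c : Char) (s : List Char) :
    pvPad c s = List.replicate (32 - s.length) c ++ s := by
  fun_induction pvPad with
  | case1 s h ih =>
    have h32 : 32 - s.length = (32 - (c :: s).length) + 1 := by simp at h ⊢; omega
    rw [ih, h32, List.replicate_succ']
    simp
  | case2 s h =>
    have : 32 - s.length = 0 := by omega
    simp [this]

theorem pvBin_len (k : Nat) : ∀ n, n < 2 ^ k → 1 ≤ k → (pvBin n).length ≤ k := by
  induction k with
  | zero => intro n _ h; omega
  | succ k ih =>
    intro n hn _
    by_cases h1 : n ≤ 1
    · rw [pvBin]; simp [h1]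
    · rw [pvBin]; simp [h1]
      have hk : 1 ≤ k := by
        by_contra hk
        have : k = 0 := by omega
        subst this; simp at hn; omega
      have hd : n / 2 < 2 ^ k := by
        have : (2 : Nat) ^ (k + 1) = 2 * 2 ^ k := by ring
        omega
      have := ih (n / 2) hd hk
      omega

theorem pvBitsFix_zero (k : Nat) : pvBitsFix k 0 = List.replicate k '0' := by
  induction k with
  | zero => rfl
  | succ k ih => simp [pvBitsFix, ih, pvBit, List.replicate_succ']

theorem pvBitsFix_ones (k : Nat) : pvBitsFix k (2 ^ k - 1) = List.replicate k '1' := by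
  induction k with
  | zero => rfl
  | succ k ih =>
    have h2 : (2 : Nat) ^ (k + 1) = 2 * 2 ^ k := by ring
    have hpos : 1 ≤ 2 ^ k := Nat.one_le_two_pow
    have hdiv : (2 ^ (k + 1) - 1) / 2 = 2 ^ k - 1 := by omega
    have hmod : (2 ^ (k + 1) - 1) % 2 = 1 := by omega
    simp [pvBitsFix, hdiv, hmod, ih, pvBit, List.replicate_succ']

theorem pvBin_fix (k : Nat) : ∀ n, n < 2 ^ k → 1 ≤ k →
    List.replicate (k - (pvBin n).length) '0' ++ pvBin n = pvBitsFix k n := by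
  induction k with
  | zero => intro n _ h; omega
  | succ k ih =>
    intro n hn _
    by_cases h1 : n ≤ 1
    · have hd : n / 2 = 0 := by omega
      rw [pvBin]
      simp [h1, pvBitsFix, hd, pvBitsFix_zero]
    · have hk : 1 ≤ k := by
        by_contra hk
        have : k = 0 := by omega
        subst this; simp at hn; omega
      have hd : n / 2 < 2 ^ k := by
        have : (2 : Nat) ^ (k + 1) = 2 * 2 ^ k := by ring
        omega
      have hlen := pvBin_len k (n / 2) hd hk
      rw [pvBin]
      simp only [h1, if_false, pvBitsFix]
      rw [← ih (n / 2) hd hk]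
      have : k + 1 - (pvBin (n / 2) ++ [pvBit n]).length = k - (pvBin (n / 2)).length := by
        simp
      rw [this, List.append_assoc]

theorem pvBin_fix_inv (k : Nat) : ∀ n, n < 2 ^ k → 1 ≤ k →
    List.replicate (k - (pvBin n).length) '1'
      ++ (pvBin n).map (fun c => if c = '1' then '0' else '1')
      = pvBitsFix k (2 ^ k - 1 - n) := by
  induction k with
  | zero => intro n _ h; omega
  | succ k ih =>
    intro n hn _
    have h2 : (2 : Nat) ^ (k + 1) = 2 * 2 ^ k := by ring
    have hpos : 1 ≤ 2 ^ k := Nat.one_le_two_pow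
    have hdiv : (2 ^ (k + 1) - 1 - n) / 2 = 2 ^ k - 1 - n / 2 := by omega
    have hmod : (2 ^ (k + 1) - 1 - n) % 2 = 1 - n % 2 := by omega
    by_cases h1 : n ≤ 1
    · have hd : n / 2 = 0 := by omega
      rw [pvBin]
      simp only [h1, if_true, pvBitsFix, hdiv, hd, Nat.sub_zero]
      rw [pvBitsFix_ones]
      have hn2 := Nat.mod_two_eq_zero_or_one n
      rcases hn2 with h | h
      · have hn0 : n = 0 := by omega
        subst hn0
        simp [pvBit]
      · have hn1 : n = 1 := by omega
        subst hn1
        simp [pvBit, hmod]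
    · have hk : 1 ≤ k := by
        by_contra hk
        have : k = 0 := by omega
        subst this; simp at hn; omega
      have hd : n / 2 < 2 ^ k := by omega
      have hlen := pvBin_len k (n / 2) hd hk
      rw [pvBin]
      simp only [h1, if_false, pvBitsFix, hdiv]
      rw [← ih (n / 2) hd hk]
      have hch : (if pvBit n = '1' then '0' else '1') = pvBit (2 ^ (k + 1) - 1 - n) := by
        rcases Nat.mod_two_eq_zero_or_one n with h | h <;> simp [pvBit, h, hmod]
      have hl : k + 1 - (pvBin (n / 2) ++ [pvBit n]).length = k - (pvBin (n / 2)).length := by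
        simp
      simp only [List.map_append, List.map_cons, List.map_nil, hl]
      rw [List.append_assoc, hch]

-- ===== VERDICT (by name: the statement is the Claim_ definition above) =====
theorem int_to_bitstring_spec : Claim_equal_int_to_bitstring := by
  unfold Claim_equal_int_to_bitstring
  intro bit hdom
  unfold Spec_int_to_bitstring int_to_bitstring int_to_bitstring_alt
  have hb : -2147483648 ≤ bit ∧ bit ≤ 2147483648 := by
    simpa [Dom_int_to_bitstring, pvDomInt, decide_eq_true_eq] using hdom
  rw [PySem.Int.mod_eq_emod_of_pos (by norm_num)]
  by_cases hneg : bit < 0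
  · simp only [hneg, if_true]
    set m : Nat := (-bit - 1).toNat with hm
    have hmlt : m < 2 ^ 32 := by
      have : ((2 : Int) ^ 31) = 2147483648 := by norm_num
      omega
    have hmod : (bit % 4294967296).toNat = 2 ^ 32 - 1 - m := by
      have h1 : bit % 4294967296 = bit + 4294967296 := by omega
      omega
    have hlen : (pvInvert (pvBin m)).length ≤ 32 := by
      rw [pvInvert_eq_map, List.length_map]
      exact pvBin_len 32 m hmlt (by norm_num)
    have htr : ¬ ((pvInvert (pvBin m)).length > 32) := by omega
    simp only [htr, if_false]
    rw [pvPad_eq, pvInvert_eq_map, List.length_map, hmod]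
    exact congrArg String.ofList (pvBin_fix_inv 32 m hmlt (by norm_num))
  · simp only [hneg, if_false]
    set n : Nat := bit.toNat with hn
    have hnlt : n < 2 ^ 32 := by
      have : ((2 : Int) ^ 31) = 2147483648 := by norm_num
      omega
    have hmod : (bit % 4294967296).toNat = n := by
      have h1 : bit % 4294967296 = bit := by omega
      omega
    have hlen : (pvBin n).length ≤ 32 := pvBin_len 32 n hnlt (by norm_num)
    have htr : ¬ ((pvBin n).length > 32) := by omega
    simp only [htr, if_false]
    rw [pvPad_eq, hmod]
    exact congrArg String.ofList (pvBin_fix 32 n hnlt (by norm_num))
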